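-- pv_equiv track=rewrite | github.com/yangcatherine/4300-Big-Red-Planner | src/schedule_generator.py | _get_section_combinations
-- ===== SOURCE A (Python) =====
-- from itertools import product
--
-- def _get_section_combinations(course: dict) -> list[list[dict]]:
--     """Get all valid section combinations for a course."""
--     sections = course.get("sections", [])
--     if not sections:
--         return [[]]
--
--     # Group sections by type
--     by_type: dict[str, list[dict]] = {}
--     for sec in sections:
--         t = sec.get("type", "UNT")
--         if t not in by_type:
--             by_type[t] = []
--         by_type[t].append(sec)
--
--     type_names = list(by_type.keys())
--     choices = [by_type[t] for t in type_names]
--     combinations = []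
--     for combo in product(*choices):
--         combinations.append(list(combo))
--     return combinations
-- ===== SOURCE B (Python) =====
-- def _get_section_combinations(course: dict) -> list[list[dict]]:
--     """Get all valid section combinations for a course."""
--     by_type: dict[str, list[dict]] = {}
--     for sec in course.get("sections", []):
--         by_type.setdefault(sec.get("type", "UNT"), []).append(sec)
--
--     def combos(groups: list[list[dict]]) -> list[list[dict]]:
--         if not groups:
--             return [[]]
--         tails = combos(groups[1:])
--         return [[sec] + tail for sec in groups[0] for tail in tails]
--
--     return combos(list(by_type.values()))
-- ===== Notes on version B (the rewrite author's own statement) =====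
-- stated objective: alternative
-- what changed: The itertools.product loop over type-grouped choices is replaced by a recursive Cartesian-product function over the group list (prepending each section to every tail combination), and the two-step grouping (membership test then append) is fused into a single dict.setdefault step; the explicit empty-sections early return disappears because the recursion already yields the single empty combination there.
import Mathlib
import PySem

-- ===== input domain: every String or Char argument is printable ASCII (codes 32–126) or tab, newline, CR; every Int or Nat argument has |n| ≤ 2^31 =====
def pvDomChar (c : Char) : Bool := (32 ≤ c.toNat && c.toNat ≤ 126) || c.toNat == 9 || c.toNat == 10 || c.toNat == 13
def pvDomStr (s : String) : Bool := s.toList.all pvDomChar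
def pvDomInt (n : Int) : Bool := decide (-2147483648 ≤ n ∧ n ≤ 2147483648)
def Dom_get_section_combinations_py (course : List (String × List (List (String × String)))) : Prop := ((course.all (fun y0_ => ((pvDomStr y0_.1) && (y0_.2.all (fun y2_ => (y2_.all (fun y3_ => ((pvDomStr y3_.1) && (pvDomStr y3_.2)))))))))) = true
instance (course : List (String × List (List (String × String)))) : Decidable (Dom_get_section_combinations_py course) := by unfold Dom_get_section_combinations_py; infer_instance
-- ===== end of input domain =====

-- B replaces the itertools.product loop (ported as its documented fold equivalent) by a
-- recursive Cartesian-product function over the groups, and fuses A's two-step grouping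
-- (membership test + append) into a single dict.setdefault step; objective: alternative.

-- ===== PORT A =====
-- itertools.product(*choices) is ported as its documented equivalent: a fold that extends
-- every partial tuple by each element of the next pool (last pool varies fastest).
def get_section_combinations_py (course : List (String × List (List (String × String)))) : List (List (List (String × String))) :=
  let sections := (PySem.Dict.mk course).getD "sections" []
  if sections = [] then [[]]
  else
    let by_type : PySem.Dict String (List (List (String × String))) :=
      sections.foldl (fun d sec =>
        let t := (PySem.Dict.mk sec).getD "type" "UNT"
        let d' := if d.contains t then d else d.insert t []
        d'.modify t [] (fun l => l ++ [sec])) PySem.Dict.empty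
    let type_names := by_type.keys
    -- by_type[t] with t always a present key: getD with unused default
    let choices := type_names.map (fun t => by_type.getD t [])
    let combinations :=
      choices.foldl (fun acc pool => acc.flatMap (fun combo => pool.map (fun s => combo ++ [s]))) [[]]
    combinations

-- ===== PORT B =====
-- recursive combos(groups) from Source B
def pvCombos (groups : List (List (List (String × String)))) : List (List (List (String × String))) :=
  match groups with
  | [] => [[]]
  | g :: rest =>
    let tails := pvCombos rest
    g.flatMap (fun sec => tails.map (fun tail => sec :: tail))

def get_section_combinations_py_alt (course : List (String × List (List (String × String)))) : List (List (List (String × String))) :=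
  let by_type : PySem.Dict String (List (List (String × String))) :=
    ((PySem.Dict.mk course).getD "sections" []).foldl (fun d sec =>
      d.modify ((PySem.Dict.mk sec).getD "type" "UNT") [] (fun l => l ++ [sec])) PySem.Dict.empty
  pvCombos by_type.values

-- ===== PRECONDITION & SPEC =====
def Spec_get_section_combinations_py (course : List (String × List (List (String × String)))) (out : List (List (List (String × String)))) : Prop := out = get_section_combinations_py_alt course
instance (course : List (String × List (List (String × String)))) (out : List (List (List (String × String)))) : Decidable (Spec_get_section_combinations_py course out) := by unfold Spec_get_section_combinations_py; infer_instance

-- ===== CLAIM (what is proved, stated in full; the proofs are below) =====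
def Claim_equal_get_section_combinations_py : Prop := ∀ (course : List (String × List (List (String × String)))), Dom_get_section_combinations_py course → Spec_get_section_combinations_py course (get_section_combinations_py course)

-- ===== LEMMAS AND PROOFS =====

-- A's grouping step (explicit membership test then append) equals B's setdefault/modify step.
theorem pv_step_eq (d : PySem.Dict String (List (List (String × String)))) (t : String)
    (sec : List (String × String)) :
    (if d.contains t then d else d.insert t []).modify t [] (fun l => l ++ [sec])
      = d.modify t [] (fun l => l ++ [sec]) := by
  by_cases h : d.contains t
  · simp [h]
  · have h' : d.contains t = false := by simpa using h
    simp only [h', Bool.false_eq_true, if_false, PySem.Dict.modify,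
      PySem.Dict.getD_insert_self, PySem.Dict.insert_insert_self,
      PySem.Dict.getD_of_not_contains (d := d) (k := t) (d0 := ([] : List (List (String × String)))) h']

-- the product fold with an arbitrary accumulator, against the recursive product
theorem pv_fold_eq (gs : List (List (List (String × String))))
    (acc : List (List (List (String × String)))) :
    gs.foldl (fun acc pool => acc.flatMap (fun combo => pool.map (fun s => combo ++ [s]))) acc
      = acc.flatMap (fun c => (pvCombos gs).map (fun t => c ++ t)) := by
  induction gs generalizing acc with
  | nil => simp [pvCombos]
  | cons g rest ih =>
    simp only [List.foldl_cons, ih, pvCombos]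
    simp [List.flatMap_map, List.map_flatMap, List.map_map, Function.comp_def,
      List.flatMap_assoc, List.append_assoc]

theorem get_section_combinations_py_spec : Claim_equal_get_section_combinations_py := by
  intro course _
  unfold Spec_get_section_combinations_py get_section_combinations_py get_section_combinations_py_alt
  have hstep : (fun (d : PySem.Dict String (List (List (String × String)))) (sec : List (String × String)) =>
      let t := (PySem.Dict.mk sec).getD "type" "UNT"
      let d' := if d.contains t then d else d.insert t []
      d'.modify t [] (fun l => l ++ [sec]))
    = fun d sec => d.modify ((PySem.Dict.mk sec).getD "type" "UNT") [] (fun l => l ++ [sec]) :=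
    funext fun d => funext fun sec => pv_step_eq d _ sec
  simp only [hstep]
  set sections := (PySem.Dict.mk course).getD "sections" [] with hs
  by_cases h : sections = []
  · simp [h, pvCombos, PySem.Dict.empty, PySem.Dict.values]
  · rw [if_neg h]
    set bt := sections.foldl (fun d sec => d.modify ((PySem.Dict.mk sec).getD "type" "UNT") [] (fun l => l ++ [sec])) PySem.Dict.empty with hbt
    have hnd : bt.keys.Nodup := by
      rw [hbt]
      exact PySem.Dict.nodup_keys_foldl_modify_key sections
        (fun sec => (PySem.Dict.mk sec).getD "type" "UNT") [] (fun d sec l => l ++ [sec])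
        PySem.Dict.empty PySem.Dict.nodup_keys_empty
    rw [pv_fold_eq]
    rw [← PySem.Dict.values_eq_map_keys bt hnd []]
    simp
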